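-- pv_equiv track=rewrite | github.com/marrydzy/Learn_Sudoku | utils.py | get_house_pairs
-- ===== SOURCE A (Python) =====
-- from collections import defaultdict
--
-- def get_house_pairs(house, board):
--     """ return dictionary of pairs in the house (row, column, or box) """
--     # pairs data structure:
--     # {pair: [cell_1, cell_2]}
--     pairs_dict = defaultdict(list)
--     pairs = [board[cell] for cell in house if len(board[cell]) == 2]
--     for pair in set(pairs):
--         if pairs.count(pair) == 2:
--             for cell in house:
--                 if board[cell] == pair:
--                     pairs_dict[pair].append(cell)
--     return pairs_dict
-- ===== SOURCE B (Python) =====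
-- from collections import defaultdict
--
-- def get_house_pairs(house, board):
--     """ return dictionary of pairs in the house (row, column, or box) """
--     index = defaultdict(list)
--     for cell in house:
--         value = board[cell]
--         if len(value) == 2:
--             index[value].append(cell)
--     result = defaultdict(list)
--     for value, cells in index.items():
--         if len(cells) == 2:
--             result[value] = cells
--     return result
-- ===== Notes on version B (the rewrite author's own statement) =====
-- stated objective: simpler
-- what changed: A builds the candidate-value list, then for each distinct value counts its occurrences and rescans the whole house to collect its cells; B makes one grouping pass over the house (value -> cells index) and keeps exactly the groups of size two.
import Mathlib
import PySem

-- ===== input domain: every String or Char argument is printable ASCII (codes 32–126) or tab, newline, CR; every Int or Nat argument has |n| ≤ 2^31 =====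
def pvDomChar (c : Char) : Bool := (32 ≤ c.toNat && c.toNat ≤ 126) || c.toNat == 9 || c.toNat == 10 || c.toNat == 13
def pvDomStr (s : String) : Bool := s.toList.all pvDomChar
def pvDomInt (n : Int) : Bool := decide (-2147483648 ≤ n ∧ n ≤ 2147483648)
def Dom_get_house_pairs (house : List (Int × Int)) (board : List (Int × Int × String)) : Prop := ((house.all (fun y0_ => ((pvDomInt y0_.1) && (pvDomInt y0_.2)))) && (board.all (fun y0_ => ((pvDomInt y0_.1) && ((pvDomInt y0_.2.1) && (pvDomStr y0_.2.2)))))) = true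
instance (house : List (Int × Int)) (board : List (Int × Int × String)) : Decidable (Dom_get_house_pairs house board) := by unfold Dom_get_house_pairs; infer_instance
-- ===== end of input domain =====

-- B replaces A's per-value rescans (set + count + an inner scan of the house per value) with one
-- grouping pass over the house followed by a filter of the groups (simpler, single-pass).

-- shared helper: the Python 'board' parameter is a dict[(int,int), str]; the type convention
-- flattens its items to triples, so both ports rebuild the dict once before reading it.
def pvBoardDict (board : List (Int × Int × String)) : PySem.Dict (Int × Int) String :=
  PySem.Dict.ofList (board.map (fun e => ((e.1, e.2.1), e.2.2)))

-- ===== PORT A =====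
-- board[cell] is ported as getD with default ""; Pre_ restricts to inputs where every lookup hits,
-- so the default is never read.
def get_house_pairs (house : List (Int × Int)) (board : List (Int × Int × String)) : List (String × List (Int × Int)) :=
  let bd := pvBoardDict board
  let pairs_dict : PySem.Dict String (List (Int × Int)) := PySem.Dict.empty
  let pairs : List String := (house.map (fun cell => bd.getD cell "")).filter (fun p => PySem.Str.len p == 2)
  let pairs_dict := (PySem.Set.ofList pairs).foldl (fun d pair =>
      if PySem.List.count pairs pair == 2 then
        house.foldl (fun d cell =>
          if bd.getD cell "" == pair then d.modify pair [] (· ++ [cell]) else d) d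
      else d) pairs_dict
  pairs_dict.items

-- ===== PORT B =====
def get_house_pairs_alt (house : List (Int × Int)) (board : List (Int × Int × String)) : List (String × List (Int × Int)) :=
  let bd := pvBoardDict board
  let index : PySem.Dict String (List (Int × Int)) :=
    house.foldl (fun d cell =>
      let value := bd.getD cell ""
      if PySem.Str.len value == 2 then d.modify value [] (· ++ [cell]) else d) PySem.Dict.empty
  let result : PySem.Dict String (List (Int × Int)) :=
    index.items.foldl (fun r vc =>
      if vc.2.length == 2 then r.insert vc.1 vc.2 else r) PySem.Dict.empty
  result.items

-- ===== PRECONDITION & SPEC =====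
-- Pre_ excludes exactly the inputs where Python's board[cell] raises KeyError for some cell of the house.
def Pre_get_house_pairs (house : List (Int × Int)) (board : List (Int × Int × String)) : Prop :=
  ∀ cell ∈ house, cell ∈ board.map (fun e => (e.1, e.2.1))
instance (house : List (Int × Int)) (board : List (Int × Int × String)) : Decidable (Pre_get_house_pairs house board) := by unfold Pre_get_house_pairs; infer_instance

def pvWitness_get_house_pairs : (List (Int × Int)) × (List (Int × Int × String)) :=
  ([(0, 0), (0, 1), (1, 0), (1, 1)],
   [(0, 0, "12"), (0, 1, "12"), (1, 0, "123"), (1, 1, "3")])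

def Spec_get_house_pairs (house : List (Int × Int)) (board : List (Int × Int × String)) (out : List (String × List (Int × Int))) : Prop := out = get_house_pairs_alt house board
instance (house : List (Int × Int)) (board : List (Int × Int × String)) (out : List (String × List (Int × Int))) : Decidable (Spec_get_house_pairs house board out) := by unfold Spec_get_house_pairs; infer_instance

-- ===== CLAIM (what is proved, stated in full; the proofs are below) =====
def Claim_equal_get_house_pairs : Prop := ∀ (house : List (Int × Int)) (board : List (Int × Int × String)), Dom_get_house_pairs house board → Pre_get_house_pairs house board → Spec_get_house_pairs house board (get_house_pairs house board)

-- ===== LEMMAS AND PROOFS =====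

-- abbreviations used only by the proofs
def pvF (board : List (Int × Int × String)) (cell : Int × Int) : String :=
  (pvBoardDict board).getD cell ""
def pvPairs (house : List (Int × Int)) (board : List (Int × Int × String)) : List String :=
  (house.map (pvF board)).filter (fun p => PySem.Str.len p == 2)
def pvCells (house : List (Int × Int)) (board : List (Int × Int × String)) (v : String) : List (Int × Int) :=
  house.filter (fun c => pvF board c == v)
def pvG (house : List (Int × Int)) (board : List (Int × Int × String)) (v : String) : List (Int × Int) :=
  (house.filter (fun c => PySem.Str.len (pvF board c) == 2)).filter (fun c => pvF board c == v)

-- running A's inner append loop when (v, w) is the LAST entry and no earlier key equals v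
lemma pv_inner_run (v : String) (cs : List (Int × Int)) :
    ∀ (d0 : List (String × List (Int × Int))) (w : List (Int × Int)),
      (∀ p ∈ d0, (p.1 == v) = false) →
      (cs.foldl (fun d c => PySem.Dict.modify d v [] (· ++ [c]))
          (PySem.Dict.mk (d0 ++ [(v, w)]))).items = d0 ++ [(v, w ++ cs)] := by
  induction cs with
  | nil => intro d0 w h; simp
  | cons c cs ih =>
    intro d0 w h
    have hfind0 : d0.find? (fun p => p.1 == v) = none :=
      List.find?_eq_none.mpr (fun p hp => by simp [h p hp])
    have hget : (PySem.Dict.mk (d0 ++ [(v, w)])).getD v [] = w := by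
      simp [PySem.Dict.getD, PySem.Dict.get?, List.find?_append, hfind0]
    have hcont : (PySem.Dict.mk (d0 ++ [(v, w)])).contains v = true := by
      simp [PySem.Dict.contains]
    have hstep : PySem.Dict.modify (PySem.Dict.mk (d0 ++ [(v, w)])) v [] (· ++ [c])
        = PySem.Dict.mk (d0 ++ [(v, w ++ [c])]) := by
      have hm : PySem.Dict.modify (PySem.Dict.mk (d0 ++ [(v, w)])) v [] (· ++ [c])
          = (PySem.Dict.mk (d0 ++ [(v, w)])).insert v (w ++ [c]) := by
        simp [PySem.Dict.modify, hget]
      rw [hm]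
      apply PySem.Dict.ext
      rw [PySem.Dict.items_insert_of_contains _ _ hcont]
      show (d0 ++ [(v, w)]).map (fun p => if p.1 == v then (v, w ++ [c]) else p)
          = d0 ++ [(v, w ++ [c])]
      rw [List.map_append]
      congr 1
      · calc d0.map (fun p => if p.1 == v then (v, w ++ [c]) else p)
            = d0.map id := List.map_congr_left (fun p hp => by simp [h p hp])
          _ = d0 := List.map_id d0
      · simp
    rw [List.foldl_cons, hstep, ih d0 (w ++ [c]) h]
    simp

-- A's inner loop over a key absent from d appends one entry (v, cs)
lemma pv_inner_start (v : String) (cs : List (Int × Int)) (d : PySem.Dict String (List (Int × Int)))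
    (hd : d.contains v = false) (hcs : cs ≠ []) :
    (cs.foldl (fun d c => PySem.Dict.modify d v [] (· ++ [c])) d).items = d.items ++ [(v, cs)] := by
  have hd' : d.items.any (fun p => p.1 == v) = false := hd
  have hkeys : ∀ p ∈ d.items, (p.1 == v) = false := by
    intro p hp
    have := List.any_eq_false.mp hd' p hp
    simpa using this
  cases cs with
  | nil => exact absurd rfl hcs
  | cons c cs =>
    have hget : d.getD v [] = [] := PySem.Dict.getD_of_not_contains d [] hd
    have hstep : PySem.Dict.modify d v [] (· ++ [c]) = PySem.Dict.mk (d.items ++ [(v, [c])]) := by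
      have hm : PySem.Dict.modify d v [] (· ++ [c]) = d.insert v [c] := by
        simp [PySem.Dict.modify, hget]
      rw [hm]
      apply PySem.Dict.ext
      rw [PySem.Dict.items_insert_of_not_contains d _ hd]
    rw [List.foldl_cons, hstep, pv_inner_run v cs d.items [c] hkeys]
    simp

-- A's outer loop over a list of distinct keys absent from d appends the selected groups
lemma pv_outer (house : List (Int × Int)) (board : List (Int × Int × String)) :
    ∀ (S : List String) (d : PySem.Dict String (List (Int × Int))),
      S.Nodup → (∀ v ∈ S, d.contains v = false) →
      (∀ v ∈ S, (PySem.List.count (pvPairs house board) v == 2) = true → pvCells house board v ≠ []) →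
      (S.foldl (fun d pair =>
          if PySem.List.count (pvPairs house board) pair == 2 then
            house.foldl (fun d cell =>
              if pvF board cell == pair then d.modify pair [] (· ++ [cell]) else d) d
          else d) d).items
        = d.items ++ (S.filter (fun v => PySem.List.count (pvPairs house board) v == 2)).map
            (fun v => (v, pvCells house board v)) := by
  intro S
  induction S with
  | nil => intro d _ _ _; simp
  | cons v S ih =>
    intro d hnd hfresh hne
    have hvS : v ∉ S := (List.nodup_cons.mp hnd).1
    have hndS : S.Nodup := (List.nodup_cons.mp hnd).2
    rw [List.foldl_cons]
    by_cases hc : (PySem.List.count (pvPairs house board) v == 2) = true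
    · rw [if_pos hc]
      have hinner : house.foldl (fun d cell =>
            if pvF board cell == v then d.modify v [] (· ++ [cell]) else d) d
          = (pvCells house board v).foldl (fun d c => d.modify v [] (· ++ [c])) d :=
        PySem.List.foldl_if_eq_foldl_filter (fun cell => pvF board cell == v)
          (fun d c => d.modify v [] (· ++ [c])) house d
      rw [hinner]
      set d' := (pvCells house board v).foldl (fun d c => d.modify v [] (· ++ [c])) d with hd'
      have hitems : d'.items = d.items ++ [(v, pvCells house board v)] :=
        pv_inner_start v _ d (hfresh v (by simp)) (hne v (by simp) hc)
      have hfresh' : ∀ u ∈ S, d'.contains u = false := by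
        intro u hu
        have hvu : (v == u) = false := by
          have hne' : v ≠ u := fun hvu => hvS (hvu ▸ hu)
          simpa using hne'
        have h1 : d.items.any (fun p => p.1 == u) = false := hfresh u (List.mem_cons_of_mem _ hu)
        show d'.items.any (fun p => p.1 == u) = false
        rw [hitems]
        simp [List.any_append, h1, hvu]
      rw [ih d' hndS hfresh' (fun u hu => hne u (List.mem_cons_of_mem _ hu))]
      rw [hitems]
      have hcp : List.count v (pvPairs house board) = 2 := by
        simpa [PySem.List.count] using hc
      simp [hcp]
    · rw [if_neg hc]
      rw [ih d hndS (fun u hu => hfresh u (List.mem_cons_of_mem _ hu))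
          (fun u hu => hne u (List.mem_cons_of_mem _ hu))]
      have hcf : ¬ List.count v (pvPairs house board) = 2 := by
        simpa [PySem.List.count] using hc
      simp [hcf]

-- the number of occurrences of v among the length-2 values is the size of v's group
lemma pv_count_eq (house : List (Int × Int)) (board : List (Int × Int × String)) (v : String) :
    PySem.List.count (pvPairs house board) v = (pvG house board v).length := by
  show List.countP (· == v) ((house.map (pvF board)).filter (fun p => PySem.Str.len p == 2))
      = (pvG house board v).length
  rw [List.countP_filter, List.countP_map, List.countP_eq_length_filter]
  unfold pvG
  rw [List.filter_filter]
  apply congrArg List.length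
  apply List.filter_congr
  intro c _
  simp [Function.comp_def]

-- every member of set(pairs) is a length-2 string
lemma pv_len_two (house : List (Int × Int)) (board : List (Int × Int × String)) (v : String)
    (hv : v ∈ PySem.Set.ofList (pvPairs house board)) : (PySem.Str.len v == 2) = true := by
  have hmem := (PySem.Set.mem_ofList _ _).mp hv
  unfold pvPairs at hmem
  exact (List.mem_filter.mp hmem).2

-- for a length-2 value the group of B equals the cell list of A
lemma pv_G_eq_cells (house : List (Int × Int)) (board : List (Int × Int × String)) (v : String)
    (hv : (PySem.Str.len v == 2) = true) : pvG house board v = pvCells house board v := by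
  unfold pvG pvCells
  rw [List.filter_filter]
  apply List.filter_congr
  intro c _
  cases hb : (pvF board c == v) with
  | false => simp
  | true =>
    have hcv : pvF board c = v := eq_of_beq hb
    have hv2 : ((v.length : Int) == 2) = true := by simpa using hv
    simp [hcv, hv2]

lemma pv_cells_ne (house : List (Int × Int)) (board : List (Int × Int × String)) (v : String)
    (hv : v ∈ PySem.Set.ofList (pvPairs house board))
    (hc : (PySem.List.count (pvPairs house board) v == 2) = true) :
    pvCells house board v ≠ [] := by
  have hcount : PySem.List.count (pvPairs house board) v = 2 := by simpa using hc
  have hlen : (pvCells house board v).length = 2 := by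
    have h1 := pv_count_eq house board v
    rw [pv_G_eq_cells house board v (pv_len_two house board v hv)] at h1
    omega
  intro hnil
  rw [hnil] at hlen
  simp at hlen

lemma pv_A_eq (house : List (Int × Int)) (board : List (Int × Int × String)) :
    get_house_pairs house board
      = ((PySem.Set.ofList (pvPairs house board)).filter
            (fun v => PySem.List.count (pvPairs house board) v == 2)).map
          (fun v => (v, pvCells house board v)) := by
  have h0 : get_house_pairs house board
      = ((PySem.Set.ofList (pvPairs house board)).foldl (fun d pair =>
          if PySem.List.count (pvPairs house board) pair == 2 then
            house.foldl (fun d cell =>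
              if pvF board cell == pair then d.modify pair [] (· ++ [cell]) else d) d
          else d) PySem.Dict.empty).items := rfl
  rw [h0, pv_outer house board (PySem.Set.ofList (pvPairs house board)) PySem.Dict.empty
      (PySem.Set.nodup_ofList _)
      (fun u _ => PySem.Dict.contains_empty u)
      (fun u hu hc => pv_cells_ne house board u hu hc)]
  simp [PySem.Dict.empty]

lemma pv_B_eq (house : List (Int × Int)) (board : List (Int × Int × String)) :
    get_house_pairs_alt house board
      = ((PySem.Set.ofList (pvPairs house board)).filter
            (fun v => PySem.List.count (pvPairs house board) v == 2)).map
          (fun v => (v, pvCells house board v)) := by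
  have h0 : get_house_pairs_alt house board
      = ((house.foldl (fun d cell =>
            if PySem.Str.len (pvF board cell) == 2 then d.modify (pvF board cell) [] (· ++ [cell]) else d)
            (PySem.Dict.empty : PySem.Dict String (List (Int × Int)))).items.foldl
          (fun r vc => if vc.2.length == 2 then r.insert vc.1 vc.2 else r)
          (PySem.Dict.empty : PySem.Dict String (List (Int × Int)))).items := rfl
  rw [h0]
  have hidx : (house.foldl (fun d cell =>
        if PySem.Str.len (pvF board cell) == 2 then d.modify (pvF board cell) [] (· ++ [cell]) else d)
        (PySem.Dict.empty : PySem.Dict String (List (Int × Int))))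
      = (house.filter (fun c => PySem.Str.len (pvF board c) == 2)).foldl
          (fun d cell => d.modify (pvF board cell) [] (· ++ [cell])) PySem.Dict.empty :=
    PySem.List.foldl_if_eq_foldl_filter _ _ house _
  rw [hidx]
  set h2 := house.filter (fun c => PySem.Str.len (pvF board c) == 2) with hh2
  set idx := h2.foldl (fun d cell => d.modify (pvF board cell) [] (· ++ [cell]))
      PySem.Dict.empty with hidxdef
  have hmap : h2.map (pvF board) = pvPairs house board := by
    rw [hh2]
    unfold pvPairs
    rw [List.filter_map]
    simp only [Function.comp_def]
  have hkeys : idx.keys = PySem.Set.ofList (pvPairs house board) := by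
    rw [hidxdef, PySem.Dict.keys_foldl_modify_key h2 (pvF board)
        [] (fun _ cell => (· ++ [cell])) PySem.Dict.empty]
    rw [PySem.Dict.keys_empty, hmap]
    rfl
  have hnodup : idx.keys.Nodup := by rw [hkeys]; exact PySem.Set.nodup_ofList _
  have hgetD : ∀ u : String, idx.getD u [] = pvG house board u := by
    intro u
    rw [hidxdef]
    have hmapfold : h2.foldl (fun d cell => d.modify (pvF board cell) [] (· ++ [cell]))
          PySem.Dict.empty
        = (h2.map (fun c => (pvF board c, c))).foldl
            (fun d pr => d.modify pr.1 [] (· ++ [pr.2])) PySem.Dict.empty := by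
      rw [List.foldl_map]
    rw [hmapfold, PySem.Dict.getD_foldl_modify_append, List.filter_map]
    rw [hh2]
    unfold pvG
    simp [Function.comp_def, List.filter_filter, PySem.Dict.getD, PySem.Dict.get?,
      PySem.Dict.empty]
  have hitems : idx.items = (PySem.Set.ofList (pvPairs house board)).map
      (fun u => (u, pvG house board u)) := by
    rw [PySem.Dict.items_eq_map_keys idx hnodup [], hkeys]
    exact List.map_congr_left (fun u _ => by rw [hgetD u])
  rw [hitems]
  rw [PySem.List.foldl_if_eq_foldl_filter
      (fun vc : String × List (Int × Int) => vc.2.length == 2)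
      (fun (r : PySem.Dict String (List (Int × Int))) vc => r.insert vc.1 vc.2) _ _]
  rw [List.filter_map]
  set S2 := (PySem.Set.ofList (pvPairs house board)).filter
      ((fun vc : String × List (Int × Int) => vc.2.length == 2) ∘
        (fun u => (u, pvG house board u))) with hS2
  have hfst : ((S2.map (fun u => (u, pvG house board u))).map
      (fun vc : String × List (Int × Int) => vc.1)) = S2 := by
    simp [List.map_map, Function.comp_def]
  have hnd2 : (((S2.map (fun u => (u, pvG house board u))).map
      (fun vc : String × List (Int × Int) => vc.1))).Nodup := by
    rw [hfst]
    exact (PySem.Set.nodup_ofList _).filter _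
  rw [PySem.Dict.items_foldl_insert_fresh (S2.map (fun u => (u, pvG house board u)))
      (fun vc => vc.1) (fun vc => vc.2) PySem.Dict.empty
      (fun a _ => PySem.Dict.contains_empty _) hnd2]
  have hS2eq : S2 = (PySem.Set.ofList (pvPairs house board)).filter
      (fun u => PySem.List.count (pvPairs house board) u == 2) := by
    rw [hS2]
    apply List.filter_congr
    intro u _
    simp only [Function.comp_def]
    rw [pv_count_eq house board u]
  rw [hS2eq]
  simp only [PySem.Dict.empty, List.map_map, List.nil_append]
  apply List.map_congr_left
  intro u hu
  have huS : u ∈ PySem.Set.ofList (pvPairs house board) := (List.mem_filter.mp hu).1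
  simp [Function.comp_def, pv_G_eq_cells house board u (pv_len_two house board u huS)]

-- ===== VERDICT (by name: the statement is the Claim_ definition above) =====
theorem get_house_pairs_spec : Claim_equal_get_house_pairs := by
  intro house board _ _
  unfold Spec_get_house_pairs
  rw [pv_A_eq, pv_B_eq]
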